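-- pv_equiv track=rewrite | github.com/shtylenko-meta/rubik-emulator7 | rubik_starter.py | encode_cp
-- ===== SOURCE A (Python) =====
-- from typing import Dict, List, Tuple, Optional, Set, Any
--
-- def encode_cp(cp: List[int]) -> int:
--     """Encode corner permutation using Lehmer code. Range: 0..40319."""
--     n = 0
--     for i in range(8):
--         count = 0
--         for j in range(i + 1, 8):
--             if cp[j] < cp[i]:
--                 count += 1
--         n = n * (8 - i) + count
--     return n
-- ===== SOURCE B (Python) =====
-- def encode_cp(cp):
--     """Encode corner permutation as its Lehmer code via a sorted remaining-values
--     list: each digit is the position of cp[i] among the values not yet consumed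
--     (first-occurrence index in the sorted multiset = number of later values
--     strictly smaller), accumulated in mixed radix."""
--     rest = sorted(cp[:8])
--     n = 0
--     for i in range(8):
--         v = cp[i]
--         n = n * (8 - i) + rest.index(v)
--         rest.remove(v)
--     return n
-- ===== Notes on version B (the rewrite author's own statement) =====
-- stated objective: alternative
-- what changed: B computes the Lehmer digits by rank lookup in a sorted list of the not-yet-consumed values (rest = sorted(cp[:8]); digit = rest.index(cp[i]); rest.remove(cp[i])) instead of A's nested inversion-counting loops; the first-occurrence index in the sorted multiset equals the count of later strictly-smaller values.
import Mathlib
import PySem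

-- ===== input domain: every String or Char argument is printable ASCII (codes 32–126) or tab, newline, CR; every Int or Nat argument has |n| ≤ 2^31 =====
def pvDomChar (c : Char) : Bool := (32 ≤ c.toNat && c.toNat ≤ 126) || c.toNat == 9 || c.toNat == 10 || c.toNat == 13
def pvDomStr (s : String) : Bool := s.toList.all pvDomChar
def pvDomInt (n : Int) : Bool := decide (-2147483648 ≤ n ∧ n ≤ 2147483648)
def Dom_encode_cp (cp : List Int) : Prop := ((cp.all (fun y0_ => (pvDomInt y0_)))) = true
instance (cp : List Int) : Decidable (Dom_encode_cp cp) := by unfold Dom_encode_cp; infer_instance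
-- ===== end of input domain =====

-- B ranks cp via a sorted remaining-values list (position lookup + removal) instead of A's nested inversion-count loops; equal return value proved for lists of length ≥ 8.


-- ===== PORT A =====
-- literal port: Horner accumulation over range(8), inner inversion-count loop; cp[j] via pyGet?
-- (the .getD 0 default is never taken under Pre_, where all indices 0..7 are in range)
def encode_cp (cp : List Int) : Int :=
  (PySem.List.pyRange 0 8 1).foldl (fun n i =>
    let count : Int := (PySem.List.pyRange (i + 1) 8 1).foldl (fun c j =>
      if (PySem.List.pyGet? cp j).getD 0 < (PySem.List.pyGet? cp i).getD 0 then c + 1 else c) 0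
    n * (8 - i) + count) 0

-- ===== PORT B =====
-- literal port of Source B: rest = sorted(cp[:8]); each step reads digit = rest.index(cp[i]), then rest.remove(cp[i])
-- (the .getD defaults are never taken under Pre_: cp[i] is always a member of rest)
def encode_cp_alt (cp : List Int) : Int :=
  (((PySem.List.pyRange 0 8 1).foldl (fun (st : Int × List Int) i =>
      let v := (PySem.List.pyGet? cp i).getD 0
      let n := st.1 * (8 - i) + (((PySem.List.index? st.2 v).getD 0 : Nat) : Int)
      (n, (PySem.List.remove? st.2 v).getD st.2))
    (0, PySem.List.sorted (PySem.List.slice cp none (some 8)) (fun x => x) false))).1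

-- ===== PRECONDITION & SPEC =====
-- A raises IndexError when len(cp) < 8; exactly those inputs are excluded.
def Pre_encode_cp (cp : List Int) : Prop := 8 ≤ cp.length
instance (cp : List Int) : Decidable (Pre_encode_cp cp) := by unfold Pre_encode_cp; infer_instance
def pvWitness_encode_cp : List Int := [0, 1, 2, 3, 4, 5, 6, 7]

def Spec_encode_cp (cp : List Int) (out : Int) : Prop := out = encode_cp_alt cp
instance (cp : List Int) (out : Int) : Decidable (Spec_encode_cp cp out) := by unfold Spec_encode_cp; infer_instance

-- ===== CLAIM (what is proved, stated in full; the proofs are below) =====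
def Claim_equal_encode_cp : Prop := ∀ (cp : List Int), Dom_encode_cp cp → Pre_encode_cp cp → Spec_encode_cp cp (encode_cp cp)

-- ===== LEMMAS AND PROOFS =====

-- A's inner loop over the remaining elements, as a function of the element list
def countLT (v : Int) (t : List Int) : Int :=
  t.foldl (fun c x => if x < v then c + 1 else c) 0

-- A's whole computation, recursively over the 8-element prefix
def lehA : List Int → Int → Int
  | [], n => n
  | v :: t, n => lehA t (n * ((t.length : Int) + 1) + countLT v t)

-- B's whole computation, recursively over the prefix, threading the sorted remaining list
def lehB : List Int → List Int → Int → Int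
  | [], _, n => n
  | v :: t, s, n =>
      lehB t ((PySem.List.remove? s v).getD s)
        (n * ((t.length : Int) + 1) + (((PySem.List.index? s v).getD 0 : Nat) : Int))

lemma countLT_eq_countP (v : Int) (t : List Int) :
    countLT v t = ((t.countP (fun x => decide (x < v)) : Nat) : Int) := by
  unfold countLT
  have h := PySem.List.foldl_count_if (fun x => decide (x < v)) t 0
  simpa using h

-- first-occurrence index of a member of a sorted list = number of strictly smaller elements
lemma index_sorted (s : List Int) (v : Int) (hs : s.Pairwise (· ≤ ·)) (hv : v ∈ s) :
    PySem.List.index? s v = some (s.countP (fun x => decide (x < v))) := by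
  induction s with
  | nil => cases hv
  | cons x t ih =>
      rcases List.pairwise_cons.mp hs with ⟨hx, ht⟩
      by_cases hxv : x = v
      · subst hxv
        rw [PySem.List.index?_cons_self]
        have h0 : t.countP (fun y => decide (y < x)) = 0 :=
          List.countP_eq_zero.mpr (fun y hy => by simp [not_lt.mpr (hx y hy)])
        simp [h0]
      · have hvt : v ∈ t := by
          rcases List.mem_cons.mp hv with h | h
          · exact absurd h.symm hxv
          · exact h
        have hxlt : x < v := lt_of_le_of_ne (hx v hvt) hxv
        rw [PySem.List.index?_cons_of_ne _ hxv, ih ht hvt]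
        simp [hxlt]

-- the digit B reads off the sorted remaining list is exactly A's inversion count of the tail
lemma lehB_eq_lehA (l : List Int) (s : List Int) (hp : s.Perm l)
    (hs : s.Pairwise (· ≤ ·)) (n : Int) : lehB l s n = lehA l n := by
  induction l generalizing s n with
  | nil => rfl
  | cons v t ih =>
      have hv : v ∈ s := hp.mem_iff.mpr (by simp)
      have hrem : PySem.List.remove? s v = some (s.erase v) :=
        PySem.List.remove?_eq_some_erase s v hv
      have hperm : (s.erase v).Perm t := by
        have := hp.erase v
        rwa [List.erase_cons_head] at this
      have hidx : (((PySem.List.index? s v).getD 0 : Nat) : Int) = countLT v t := by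
        rw [index_sorted s v hs hv, Option.getD_some, countLT_eq_countP,
          hp.countP_eq (fun x => decide (x < v)), List.countP_cons]
        simp
      simp only [lehB, lehA, hrem, Option.getD_some, hidx]
      exact ih (s.erase v) hperm (hs.sublist List.erase_sublist) _

-- ===== VERDICT (by name: the statement is the Claim_ definition above) =====
set_option maxHeartbeats 2000000 in
theorem encode_cp_spec : Claim_equal_encode_cp := by
  intro cp _ hpre
  obtain ⟨a0, a1, a2, a3, a4, a5, a6, a7, rest, rfl⟩ :
      ∃ a0 a1 a2 a3 a4 a5 a6 a7 rest,
        cp = a0 :: a1 :: a2 :: a3 :: a4 :: a5 :: a6 :: a7 :: rest := by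
    unfold Pre_encode_cp at hpre
    rcases cp with _ | ⟨a0, _ | ⟨a1, _ | ⟨a2, _ | ⟨a3, _ | ⟨a4, _ | ⟨a5, _ | ⟨a6, _ | ⟨a7, rest⟩⟩⟩⟩⟩⟩⟩⟩ <;>
      first
        | exact ⟨_, _, _, _, _, _, _, _, _, rfl⟩
        | simp_all
  unfold Spec_encode_cp
  have g0 : PySem.List.pyGet? (a0 :: a1 :: a2 :: a3 :: a4 :: a5 :: a6 :: a7 :: rest) (0:Int) = some a0 := by
    rw [show (0:Int) = ((0:Nat):Int) from by norm_num, PySem.List.pyGet?_natCast]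
    rfl
  have g1 : PySem.List.pyGet? (a0 :: a1 :: a2 :: a3 :: a4 :: a5 :: a6 :: a7 :: rest) (1:Int) = some a1 := by
    rw [show (1:Int) = ((1:Nat):Int) from by norm_num, PySem.List.pyGet?_natCast]
    rfl
  have g2 : PySem.List.pyGet? (a0 :: a1 :: a2 :: a3 :: a4 :: a5 :: a6 :: a7 :: rest) (2:Int) = some a2 := by
    rw [show (2:Int) = ((2:Nat):Int) from by norm_num, PySem.List.pyGet?_natCast]
    rfl
  have g3 : PySem.List.pyGet? (a0 :: a1 :: a2 :: a3 :: a4 :: a5 :: a6 :: a7 :: rest) (3:Int) = some a3 := by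
    rw [show (3:Int) = ((3:Nat):Int) from by norm_num, PySem.List.pyGet?_natCast]
    rfl
  have g4 : PySem.List.pyGet? (a0 :: a1 :: a2 :: a3 :: a4 :: a5 :: a6 :: a7 :: rest) (4:Int) = some a4 := by
    rw [show (4:Int) = ((4:Nat):Int) from by norm_num, PySem.List.pyGet?_natCast]
    rfl
  have g5 : PySem.List.pyGet? (a0 :: a1 :: a2 :: a3 :: a4 :: a5 :: a6 :: a7 :: rest) (5:Int) = some a5 := by
    rw [show (5:Int) = ((5:Nat):Int) from by norm_num, PySem.List.pyGet?_natCast]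
    rfl
  have g6 : PySem.List.pyGet? (a0 :: a1 :: a2 :: a3 :: a4 :: a5 :: a6 :: a7 :: rest) (6:Int) = some a6 := by
    rw [show (6:Int) = ((6:Nat):Int) from by norm_num, PySem.List.pyGet?_natCast]
    rfl
  have g7 : PySem.List.pyGet? (a0 :: a1 :: a2 :: a3 :: a4 :: a5 :: a6 :: a7 :: rest) (7:Int) = some a7 := by
    rw [show (7:Int) = ((7:Nat):Int) from by norm_num, PySem.List.pyGet?_natCast]
    rfl
  have hsl : PySem.List.slice (a0 :: a1 :: a2 :: a3 :: a4 :: a5 :: a6 :: a7 :: rest) none (some 8)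
      = [a0, a1, a2, a3, a4, a5, a6, a7] := by
    rw [show (8:Int) = ((8:Nat):Int) from by norm_num, PySem.List.slice_to_natCast]
    rfl
  have hA : encode_cp (a0 :: a1 :: a2 :: a3 :: a4 :: a5 :: a6 :: a7 :: rest)
      = lehA [a0, a1, a2, a3, a4, a5, a6, a7] 0 := by
    norm_num [encode_cp, lehA, countLT,
    show PySem.List.pyRange 0 8 1 = [0, 1, 2, 3, 4, 5, 6, 7] from by decide,
    show PySem.List.pyRange 1 8 1 = [1, 2, 3, 4, 5, 6, 7] from by decide,
    show PySem.List.pyRange 2 8 1 = [2, 3, 4, 5, 6, 7] from by decide,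
    show PySem.List.pyRange 3 8 1 = [3, 4, 5, 6, 7] from by decide,
    show PySem.List.pyRange 4 8 1 = [4, 5, 6, 7] from by decide,
    show PySem.List.pyRange 5 8 1 = [5, 6, 7] from by decide,
    show PySem.List.pyRange 6 8 1 = [6, 7] from by decide,
    show PySem.List.pyRange 7 8 1 = [7] from by decide,
    show PySem.List.pyRange 8 8 1 = ([]:List Int) from by decide,
    g0, g1, g2, g3, g4, g5, g6, g7]
  have hB : encode_cp_alt (a0 :: a1 :: a2 :: a3 :: a4 :: a5 :: a6 :: a7 :: rest)
      = lehB [a0, a1, a2, a3, a4, a5, a6, a7]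
          (PySem.List.sorted [a0, a1, a2, a3, a4, a5, a6, a7] (fun x => x) false) 0 := by
    norm_num [encode_cp_alt, lehB, hsl,
    show PySem.List.pyRange 0 8 1 = [0,1,2,3,4,5,6,7] from by decide,
    g0, g1, g2, g3, g4, g5, g6, g7]
  rw [hA, hB, lehB_eq_lehA]
  · exact PySem.List.sorted_perm _ _ _
  · exact PySem.List.sorted_pairwise _ _
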